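-- pv_equiv track=rewrite | github.com/f-ptak/Pracownia-Programowania-I | 01 - Misc/Retries (Test 1)/5.3.2 print N number of asterisks separated by slashes.py | asterisks_slashes
-- ===== SOURCE A (Python) =====
-- def asterisks_slashes(n):
--     streeng = ''
--     last = ('*')
--     if n == 1:
--         return last
--     else:
--         for i in range(n-1):
--             streeng += '*/'
--         return streeng + last
-- ===== SOURCE B (Python) =====
-- def asterisks_slashes(n):
--     return '*/' * (n - 1) + '*'
-- ===== Notes on version B (the rewrite author's own statement) =====
-- stated objective: simpler
-- what changed: Replaces the special-case branch and the character-by-character accumulation loop with the single closed form '*/' * (n - 1) + '*', which covers the base case and all non-positive counts via Python's empty repetition.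
import Mathlib
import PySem

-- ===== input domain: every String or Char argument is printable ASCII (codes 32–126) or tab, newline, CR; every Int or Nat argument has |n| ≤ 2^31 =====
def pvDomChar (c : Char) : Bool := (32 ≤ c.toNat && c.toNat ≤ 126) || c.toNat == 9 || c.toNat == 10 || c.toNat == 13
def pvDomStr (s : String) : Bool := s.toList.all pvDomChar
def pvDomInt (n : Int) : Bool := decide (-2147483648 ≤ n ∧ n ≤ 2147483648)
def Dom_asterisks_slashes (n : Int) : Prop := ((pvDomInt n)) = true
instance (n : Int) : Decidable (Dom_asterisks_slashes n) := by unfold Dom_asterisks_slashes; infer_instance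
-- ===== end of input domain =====

-- B replaces A's n==1 branch and accumulation loop by the closed form '*/'*(n-1)+'*' (objective: simpler).

-- ===== PORT A =====
-- literal transliteration: streeng = ''; last = '*'; if n == 1 return last;
-- else append '*/' once per element of range(n-1), then return streeng + last
def asterisks_slashes (n : Int) : String :=
  let streeng : String := ""
  let last : String := "*"
  if n = 1 then last
  else ((PySem.List.pyRange 0 (n - 1) 1).foldl (fun s _ => s ++ "*/") streeng) ++ last

-- ===== PORT B =====
-- '*/' * (n - 1) is '' for n - 1 ≤ 0 (Python string repetition), ported as join of replicate
def asterisks_slashes_alt (n : Int) : String :=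
  String.join (List.replicate (n - 1).toNat "*/") ++ "*"

-- ===== PRECONDITION & SPEC =====
def Spec_asterisks_slashes (n : Int) (out : String) : Prop := out = asterisks_slashes_alt n
instance (n : Int) (out : String) : Decidable (Spec_asterisks_slashes n out) := by unfold Spec_asterisks_slashes; infer_instance

-- ===== CLAIM (what is proved, stated in full; the proofs are below) =====
def Claim_equal_asterisks_slashes : Prop := ∀ (n : Int), Dom_asterisks_slashes n → Spec_asterisks_slashes n (asterisks_slashes n)

-- ===== LEMMAS AND PROOFS =====

-- folding ++ over strings pulls the accumulator out front
theorem strfold_pull (l : List String) (a : String) :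
    List.foldl (fun r s => r ++ s) a l = a ++ List.foldl (fun r s => r ++ s) "" l := by
  induction l generalizing a with
  | nil => simp
  | cons b bs ih =>
      simp only [List.foldl_cons]
      rw [ih (a ++ b), ih ("" ++ b)]
      simp [String.append_assoc]

-- A's loop appends '*/' once per list element: it equals acc ++ join (replicate l.length '*/')
theorem foldl_append_block (l : List Int) (acc : String) :
    l.foldl (fun s _ => s ++ "*/") acc = acc ++ String.join (List.replicate l.length "*/") := by
  induction l generalizing acc with
  | nil => simp [String.join]
  | cons x xs ih =>
      simp only [List.foldl, List.length_cons, List.replicate_succ, String.join, List.foldl_cons]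
      rw [ih]
      simp only [String.join]
      rw [strfold_pull (List.replicate xs.length "*/") ("" ++ "*/")]
      simp [String.append_assoc]

-- ===== VERDICT (by name: the statement is the Claim_ definition above) =====
theorem asterisks_slashes_spec : Claim_equal_asterisks_slashes := by
  intro n _
  unfold Spec_asterisks_slashes asterisks_slashes asterisks_slashes_alt
  by_cases h : n = 1
  · subst h; decide
  · simp only [if_neg h]
    rw [foldl_append_block]
    simp [PySem.List.pyRange_one]
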